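-- pv_equiv track=rewrite | github.com/megantoronto/crossfit-open-app | total_reps.py | gen_table_colors
-- ===== SOURCE A (Python) =====
-- def gen_table_colors(df,rowEvenColor,rowOddColor):
--     table_colors=[]
--     for i in range(len(df)):
--         if i % 2==0:
--             table_colors.append(rowEvenColor)
--         else:
--             table_colors.append(rowOddColor)
--     return table_colors
-- ===== SOURCE B (Python) =====
-- def gen_table_colors(df, rowEvenColor, rowOddColor):
--     n = len(df)
--     return ([rowEvenColor, rowOddColor] * ((n + 1) // 2))[:n]
-- ===== Notes on version B (the rewrite author's own statement) =====
-- stated objective: idiomatic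
-- what changed: Replaces the index loop with per-element parity branching by tiling the two-color pattern via list multiplication and trimming with a slice.
import Mathlib
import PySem

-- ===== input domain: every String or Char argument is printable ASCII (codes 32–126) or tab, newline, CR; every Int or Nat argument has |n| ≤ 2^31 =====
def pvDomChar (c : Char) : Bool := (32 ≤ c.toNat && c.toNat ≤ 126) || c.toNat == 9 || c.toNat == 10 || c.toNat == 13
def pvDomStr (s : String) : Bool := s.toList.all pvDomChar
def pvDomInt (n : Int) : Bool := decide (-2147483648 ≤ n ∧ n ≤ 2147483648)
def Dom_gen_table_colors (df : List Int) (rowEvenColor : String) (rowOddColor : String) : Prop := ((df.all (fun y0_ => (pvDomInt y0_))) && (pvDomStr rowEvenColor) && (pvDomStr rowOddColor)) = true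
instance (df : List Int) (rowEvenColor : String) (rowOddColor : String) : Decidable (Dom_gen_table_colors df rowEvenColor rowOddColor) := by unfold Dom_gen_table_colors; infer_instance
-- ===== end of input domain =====

-- B builds the alternating color list by tiling the 2-element pattern and slicing to length (idiomatic; same cost as A).


-- ===== PORT A =====
-- loop `for i in range(len(df)): append(rowEvenColor if i%2==0 else rowOddColor)` as a foldl
def gen_table_colors (df : List Int) (rowEvenColor : String) (rowOddColor : String) : List String :=
  (PySem.List.pyRange 0 (df.length : Int) 1).foldl
    (fun table_colors i =>
      if PySem.Int.mod i 2 == 0 then table_colors ++ [rowEvenColor]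
      else table_colors ++ [rowOddColor]) []

-- ===== PORT B =====
-- ([rowEvenColor, rowOddColor] * ((n + 1) // 2))[:n]
def gen_table_colors_alt (df : List Int) (rowEvenColor : String) (rowOddColor : String) : List String :=
  PySem.List.slice
    (List.flatten (List.replicate (PySem.Int.floordiv ((df.length : Int) + 1) 2).toNat
      [rowEvenColor, rowOddColor]))
    none (some (df.length : Int))

-- ===== PRECONDITION & SPEC =====
def Spec_gen_table_colors (df : List Int) (rowEvenColor : String) (rowOddColor : String) (out : List String) : Prop := out = gen_table_colors_alt df rowEvenColor rowOddColor
instance (df : List Int) (rowEvenColor : String) (rowOddColor : String) (out : List String) : Decidable (Spec_gen_table_colors df rowEvenColor rowOddColor out) := by unfold Spec_gen_table_colors; infer_instance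

-- ===== CLAIM (what is proved, stated in full; the proofs are below) =====
def Claim_equal_gen_table_colors : Prop := ∀ (df : List Int) (rowEvenColor : String) (rowOddColor : String), Dom_gen_table_colors df rowEvenColor rowOddColor → Spec_gen_table_colors df rowEvenColor rowOddColor (gen_table_colors df rowEvenColor rowOddColor)

-- ===== LEMMAS AND PROOFS =====

-- ===== VERDICT (by name: the statement is the Claim_ definition above) =====
-- the closed pattern both programs compute, indexed by the length
lemma pattern_eq (n : Nat) (e o : String) :
    (List.range n).map (fun i => if i % 2 = 0 then e else o)
      = (List.flatten (List.replicate ((n + 1) / 2) [e, o])).take n := by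
  induction n using Nat.strong_induction_on with
  | _ n ih =>
    match n with
    | 0 => rfl
    | 1 => rfl
    | (m + 2) =>
      have h2 : (m + 2 + 1) / 2 = (m + 1) / 2 + 1 := by omega
      rw [h2, List.replicate_succ, List.flatten_cons]
      rw [List.range_succ_eq_map, List.range_succ_eq_map]
      simp only [List.map_cons, List.map_map]
      have : ((fun i => if i % 2 = 0 then e else o) ∘ Nat.succ ∘ Nat.succ)
          = (fun i => if i % 2 = 0 then e else o) := by
        funext i
        have h : (i + 1 + 1) % 2 = i % 2 := by omega
        simp only [Function.comp, Nat.succ_eq_add_one, h]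
      rw [this, ih m (by omega)]
      simp

theorem gen_table_colors_spec : Claim_equal_gen_table_colors := by
  intro df e o _
  unfold Spec_gen_table_colors gen_table_colors gen_table_colors_alt
  rw [PySem.List.pyRange_zero_natCast]
  have hb : (fun (table_colors : List String) (i : Int) =>
      if PySem.Int.mod i 2 == 0 then table_colors ++ [e] else table_colors ++ [o])
      = fun table_colors i => table_colors ++ [if PySem.Int.mod i 2 == 0 then e else o] := by
    funext tc i; split <;> simp_all
  rw [hb, PySem.List.foldl_append_singleton_eq_map]
  rw [PySem.List.slice_to_natCast]
  have hf : ((df.length : Int) + 1) = ((df.length + 1 : Nat) : Int) := by push_cast; ring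
  rw [hf]
  rw [show ((2 : Int)) = ((2 : Nat) : Int) from rfl, PySem.Int.floordiv_natCast]
  simp only [Int.toNat_natCast, List.map_map]
  rw [← pattern_eq]
  simp only [List.nil_append]
  congr 1
  funext i
  simp only [Function.comp, PySem.Int.mod_natCast]
  by_cases h : i % 2 = 0
  · simp [h]
  · simp [h]
    omega
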